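-- pv_equiv track=rewrite | github.com/weiyi175/personality-dungeon | evolution/local_graph.py | _build_ring4
-- ===== SOURCE A (Python) =====
-- def _build_ring4(n: int) -> list[list[int]]:
--     """Build ring-4: player i connects to i-2, i-1, i+1, i+2 (mod n)."""
--     if int(n) < 5:
--         raise ValueError(f"ring4 requires at least 5 players, got {n}")
--     n = int(n)
--     adj: list[list[int]] = []
--     for i in range(n):
--         nbrs = sorted({
--             (i - 2) % n,
--             (i - 1) % n,
--             (i + 1) % n,
--             (i + 2) % n,
--         })
--         adj.append(nbrs)
--     return adj
-- ===== SOURCE B (Python) =====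
-- def _build_ring4(n: int) -> list[list[int]]:
--     """Build ring-4 via a closed-form branch table: each row is emitted
--     already in ascending order, so no set or sort is needed."""
--     if int(n) < 5:
--         raise ValueError(f"ring4 requires at least 5 players, got {n}")
--     n = int(n)
--     adj: list[list[int]] = []
--     for i in range(n):
--         if i == 0:
--             row = [1, 2, n - 2, n - 1]
--         elif i == 1:
--             row = [0, 2, 3, n - 1]
--         elif i == n - 2:
--             row = [0, n - 4, n - 3, n - 1]
--         elif i == n - 1:
--             row = [0, 1, n - 3, n - 2]
--         else:
--             row = [i - 2, i - 1, i + 1, i + 2]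
--         adj.append(row)
--     return adj
-- ===== Notes on version B (the rewrite author's own statement) =====
-- stated objective: simpler
-- what changed: B replaces A's per-node construction of a 4-element set followed by sorting with a closed-form branch table that emits each neighbor row directly in ascending order (boundary rows written out, interior rows [i-2,i-1,i+1,i+2]), so no set build and no sort is performed per node.
import Mathlib
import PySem

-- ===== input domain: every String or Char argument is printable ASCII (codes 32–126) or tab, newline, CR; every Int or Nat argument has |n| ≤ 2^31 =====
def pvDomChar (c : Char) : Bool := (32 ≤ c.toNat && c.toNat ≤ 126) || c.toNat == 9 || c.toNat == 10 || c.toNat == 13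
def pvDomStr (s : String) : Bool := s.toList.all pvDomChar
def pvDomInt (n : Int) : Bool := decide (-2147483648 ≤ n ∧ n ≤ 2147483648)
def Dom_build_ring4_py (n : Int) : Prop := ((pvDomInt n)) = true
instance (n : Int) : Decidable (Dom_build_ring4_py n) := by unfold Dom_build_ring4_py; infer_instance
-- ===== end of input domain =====

-- B replaces A's per-node sorted-set construction by a closed-form branch table that
-- emits each neighbor row already in ascending order (objective: simpler/alternative).

-- ===== PORT A =====
def build_ring4_py (n : Int) : List (List Int) :=
  (PySem.List.pyRange 0 n 1).foldl
    (fun adj i =>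
      adj ++ [PySem.List.sorted
        (PySem.Set.ofList
          [PySem.Int.mod (i - 2) n, PySem.Int.mod (i - 1) n,
           PySem.Int.mod (i + 1) n, PySem.Int.mod (i + 2) n])
        (fun x => x) false]) []

-- ===== PORT B =====
def ring4Row (n i : Int) : List Int :=
  if i = 0 then [1, 2, n - 2, n - 1]
  else if i = 1 then [0, 2, 3, n - 1]
  else if i = n - 2 then [0, n - 4, n - 3, n - 1]
  else if i = n - 1 then [0, 1, n - 3, n - 2]
  else [i - 2, i - 1, i + 1, i + 2]

def build_ring4_py_alt (n : Int) : List (List Int) :=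
  (PySem.List.pyRange 0 n 1).foldl (fun adj i => adj ++ [ring4Row n i]) []

-- ===== PRECONDITION & SPEC =====
-- A raises ValueError for n < 5; Pre_ admits exactly the inputs where A returns.
def Pre_build_ring4_py (n : Int) : Prop := 5 ≤ n
instance (n : Int) : Decidable (Pre_build_ring4_py n) := by unfold Pre_build_ring4_py; infer_instance
def pvWitness_build_ring4_py : Int := (7)

def Spec_build_ring4_py (n : Int) (out : List (List Int)) : Prop := out = build_ring4_py_alt n
instance (n : Int) (out : List (List Int)) : Decidable (Spec_build_ring4_py n out) := by unfold Spec_build_ring4_py; infer_instance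

-- ===== CLAIM (what is proved, stated in full; the proofs are below) =====
def Claim_equal_build_ring4_py : Prop := ∀ (n : Int), Dom_build_ring4_py n → Pre_build_ring4_py n → Spec_build_ring4_py n (build_ring4_py n)

-- ===== LEMMAS AND PROOFS =====

-- set(…) of four pairwise-distinct elements is just the four-element list
theorem setOfList4 {a b c d : Int} (hab : a ≠ b) (hac : a ≠ c) (had : a ≠ d)
    (hbc : b ≠ c) (hbd : b ≠ d) (hcd : c ≠ d) :
    PySem.Set.ofList [a, b, c, d] = [a, b, c, d] := by
  simp [PySem.Set.ofList, PySem.Set.add, PySem.Set.contains, Ne.symm hab, Ne.symm hac, Ne.symm had, Ne.symm hbc, Ne.symm hbd, Ne.symm hcd]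

-- small emod facts used to evaluate the four residues
theorem emod_pos_small {x n : Int} (h1 : 0 ≤ x) (h2 : x < n) : x % n = x :=
  Int.emod_eq_of_lt h1 h2

theorem emod_neg_small {x n : Int} (h1 : 0 ≤ x + n) (h2 : x < 0) : x % n = x + n := by
  have h := Int.add_mul_emod_self_left (a := x) (b := n) (c := 1)
  rw [mul_one] at h
  rw [← h]
  exact Int.emod_eq_of_lt (by omega) (by omega)

theorem emod_wrap {x n : Int} (h1 : n ≤ x) (h2 : x < n + n) : x % n = x - n := by
  have h := Int.add_mul_emod_self_left (a := x - n) (b := n) (c := 1)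
  rw [mul_one] at h
  have hx : x - n + n = x := by ring
  rw [hx] at h
  rw [h]
  exact Int.emod_eq_of_lt (by omega) (by omega)

-- A's sorted-set row equals B's branch-table row for every node 0 ≤ i < n, n ≥ 5
theorem row_eq (n i : Int) (hn : 5 ≤ n) (h0 : 0 ≤ i) (hi : i < n) :
    PySem.List.sorted
        (PySem.Set.ofList
          [PySem.Int.mod (i - 2) n, PySem.Int.mod (i - 1) n,
           PySem.Int.mod (i + 1) n, PySem.Int.mod (i + 2) n])
        (fun x => x) false = ring4Row n i := by
  have hpos : (0:Int) < n := by omega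
  simp only [PySem.Int.mod_eq_emod_of_pos hpos]
  rcases eq_or_ne i 0 with h|hne0
  · subst h
    rw [emod_neg_small (x := (0:Int) - 2) (by omega) (by omega),
        emod_neg_small (x := (0:Int) - 1) (by omega) (by omega),
        emod_pos_small (x := (0:Int) + 1) (by omega) (by omega),
        emod_pos_small (x := (0:Int) + 2) (by omega) (by omega),
        setOfList4 (by omega) (by omega) (by omega) (by omega) (by omega) (by omega),
        PySem.List.sorted_eq_of_perm_of_pairwise_lt _ [0 + 1, 0 + 2, 0 - 2 + n, 0 - 1 + n] _
          (by simpa using List.perm_append_comm (l₁ := [0 + 1, 0 + 2]) (l₂ := [0 - 2 + n, 0 - 1 + n]))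
          (by simp [List.pairwise_cons]; omega)]
    unfold ring4Row
    rw [if_pos rfl]
    simp only [List.cons.injEq, and_true]
    omega
  · rcases eq_or_ne i 1 with h|hne1
    · subst h
      rw [emod_neg_small (x := (1:Int) - 2) (by omega) (by omega),
          emod_pos_small (x := (1:Int) - 1) (by omega) (by omega),
          emod_pos_small (x := (1:Int) + 1) (by omega) (by omega),
          emod_pos_small (x := (1:Int) + 2) (by omega) (by omega),
          setOfList4 (by omega) (by omega) (by omega) (by omega) (by omega) (by omega),
          PySem.List.sorted_eq_of_perm_of_pairwise_lt _ [1 - 1, 1 + 1, 1 + 2, 1 - 2 + n] _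
            (by simpa using List.perm_append_comm (l₁ := [1 - 1, 1 + 1, 1 + 2]) (l₂ := [1 - 2 + n]))
            (by simp [List.pairwise_cons]; omega)]
      unfold ring4Row
      rw [if_neg (by omega), if_pos rfl]
      simp only [List.cons.injEq, and_true]
      omega
    · rcases eq_or_ne i (n - 2) with h|hne2
      · subst h
        rw [emod_pos_small (x := n - 2 - 2) (by omega) (by omega),
            emod_pos_small (x := n - 2 - 1) (by omega) (by omega),
            emod_pos_small (x := n - 2 + 1) (by omega) (by omega),
            emod_wrap (x := n - 2 + 2) (by omega) (by omega),
            setOfList4 (by omega) (by omega) (by omega) (by omega) (by omega) (by omega),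
            PySem.List.sorted_eq_of_perm_of_pairwise_lt _
              [n - 2 + 2 - n, n - 2 - 2, n - 2 - 1, n - 2 + 1] _
              (by simpa using List.perm_append_comm (l₁ := [n - 2 + 2 - n]) (l₂ := [n - 2 - 2, n - 2 - 1, n - 2 + 1]))
              (by simp [List.pairwise_cons]; omega)]
        unfold ring4Row
        rw [if_neg (by omega), if_neg (by omega), if_pos rfl]
        simp only [List.cons.injEq, and_true]
        omega
      · rcases eq_or_ne i (n - 1) with h|hne3
        · subst h
          rw [emod_pos_small (x := n - 1 - 2) (by omega) (by omega),
              emod_pos_small (x := n - 1 - 1) (by omega) (by omega),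
              emod_wrap (x := n - 1 + 1) (by omega) (by omega),
              emod_wrap (x := n - 1 + 2) (by omega) (by omega),
              setOfList4 (by omega) (by omega) (by omega) (by omega) (by omega) (by omega),
              PySem.List.sorted_eq_of_perm_of_pairwise_lt _
                [n - 1 + 1 - n, n - 1 + 2 - n, n - 1 - 2, n - 1 - 1] _
                (by simpa using List.perm_append_comm (l₁ := [n - 1 + 1 - n, n - 1 + 2 - n]) (l₂ := [n - 1 - 2, n - 1 - 1]))
                (by simp [List.pairwise_cons]; omega)]
          unfold ring4Row
          rw [if_neg (by omega), if_neg (by omega), if_neg (by omega), if_pos rfl]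
          simp only [List.cons.injEq, and_true]
          omega
        · -- interior node: 2 ≤ i ≤ n - 3, the four offsets are untouched by mod
          rw [emod_pos_small (x := i - 2) (by omega) (by omega),
              emod_pos_small (x := i - 1) (by omega) (by omega),
              emod_pos_small (x := i + 1) (by omega) (by omega),
              emod_pos_small (x := i + 2) (by omega) (by omega),
              setOfList4 (by omega) (by omega) (by omega) (by omega) (by omega) (by omega),
              PySem.List.sorted_eq_self_of_pairwise _ _ (by simp [List.pairwise_cons]; omega)]
          unfold ring4Row
          rw [if_neg hne0, if_neg hne1, if_neg hne2, if_neg hne3]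

-- ===== VERDICT (by name: the statement is the Claim_ definition above) =====
theorem build_ring4_py_spec : Claim_equal_build_ring4_py := by
  intro n _ hn
  unfold Spec_build_ring4_py build_ring4_py build_ring4_py_alt
  rw [PySem.List.foldl_append_singleton_eq_map, PySem.List.foldl_append_singleton_eq_map]
  refine List.map_congr_left ?_
  intro i hi
  rw [PySem.List.mem_pyRange_one] at hi
  exact row_eq n i hn hi.1 hi.2
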